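-- pv_equiv track=rewrite | github.com/rojter-tech/Codility | Python/Lesson05/Lesson[5-2]Five_firstattempt.py | minimalfrompart
-- ===== SOURCE A (Python) =====
-- def minimalfrompart(p, q, onesIndex, twosIndex, threesIndex, foursIndex):
--     for elem in onesIndex:
--         if elem >= p and elem <= q:
--             return 1
--     for elem in twosIndex:
--         if elem >= p and elem <= q:
--             return 2
--     for elem in threesIndex:
--         if elem >= p and elem <= q:
--             return 3
--     for elem in foursIndex:
--         if elem >= p and elem <= q:
--             return 4
-- ===== SOURCE B (Python) =====
-- def minimalfrompart(p, q, onesIndex, twosIndex, threesIndex, foursIndex):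
--     def hit(lst):
--         s = sorted(lst)
--         lo, hi = 0, len(s)
--         while lo < hi:
--             mid = (lo + hi) // 2
--             if s[mid] < p:
--                 lo = mid + 1
--             else:
--                 hi = mid
--         return lo < len(s) and s[lo] <= q
--     for digit, lst in enumerate((onesIndex, twosIndex, threesIndex, foursIndex), 1):
--         if hit(lst):
--             return digit
--     return None
-- ===== Notes on version B (the rewrite author's own statement) =====
-- stated objective: alternative
-- what changed: Replaces A's four unrolled linear scans for an element in [p,q] with one enumerate loop over the four lists where each list is sorted and the smallest element >= p is located by a hand-written binary search and compared with q.
import Mathlib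
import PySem

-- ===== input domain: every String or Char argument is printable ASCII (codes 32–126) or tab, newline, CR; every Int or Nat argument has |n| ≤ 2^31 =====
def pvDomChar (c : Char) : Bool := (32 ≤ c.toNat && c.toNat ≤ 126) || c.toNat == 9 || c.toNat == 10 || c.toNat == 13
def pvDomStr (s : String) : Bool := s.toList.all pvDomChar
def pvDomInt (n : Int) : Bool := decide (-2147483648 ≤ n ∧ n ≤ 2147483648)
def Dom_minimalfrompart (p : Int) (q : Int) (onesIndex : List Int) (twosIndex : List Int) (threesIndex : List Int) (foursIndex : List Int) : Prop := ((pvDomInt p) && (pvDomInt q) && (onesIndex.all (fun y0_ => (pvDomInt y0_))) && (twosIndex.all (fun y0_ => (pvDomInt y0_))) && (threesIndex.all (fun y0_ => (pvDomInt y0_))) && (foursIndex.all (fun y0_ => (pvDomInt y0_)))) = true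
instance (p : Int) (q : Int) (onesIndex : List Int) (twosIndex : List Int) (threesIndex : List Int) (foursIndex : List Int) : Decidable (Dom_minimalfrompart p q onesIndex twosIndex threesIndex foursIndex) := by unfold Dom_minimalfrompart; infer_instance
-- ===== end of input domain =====

-- B replaces A's four unrolled linear scans by one loop over the four (digit, list) pairs,
-- sorting each list and binary-searching for the smallest element ≥ p (alternative structure, not claimed faster).

-- ===== PORT A =====
-- one Python 'for elem in lst: if elem >= p and elem <= q: return d' loop
def pvScanA (p q d : Int) : List Int → Option Int
  | [] => none
  | e :: r => if p ≤ e ∧ e ≤ q then some d else pvScanA p q d r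

def minimalfrompart (p : Int) (q : Int) (onesIndex : List Int) (twosIndex : List Int) (threesIndex : List Int) (foursIndex : List Int) : Option Int :=
  match pvScanA p q 1 onesIndex with
  | some v => some v
  | none =>
    match pvScanA p q 2 twosIndex with
    | some v => some v
    | none =>
      match pvScanA p q 3 threesIndex with
      | some v => some v
      | none =>
        match pvScanA p q 4 foursIndex with
        | some v => some v
        | none => none

-- ===== PORT B =====
-- Source B's hand-written bisect_left while-loop, step for step (s[mid] is always in range when taken)
-- fuel is only a structural totality guard: hi - lo shrinks every iteration, so fuel = length suffices
def pvBl (s : List Int) (p : Int) : Nat → Nat → Nat → Nat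
  | 0, lo, _ => lo
  | fuel + 1, lo, hi =>
    if lo < hi then
      let mid := (lo + hi) / 2
      if s.getD mid 0 < p then pvBl s p fuel (mid + 1) hi else pvBl s p fuel lo mid
    else lo

-- Source B's 'hit': sort, binary-search the first element ≥ p, compare with q
def pvHit (p q : Int) (lst : List Int) : Bool :=
  let s := PySem.List.sorted lst (fun x => x) false
  let lo := pvBl s p s.length 0 s.length
  decide (lo < s.length) && decide (s.getD lo 0 ≤ q)

-- Source B's 'for digit, lst in enumerate((...), 1)' loop
def pvFind (p q : Int) : List (Int × List Int) → Option Int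
  | [] => none
  | (d, l) :: r => if pvHit p q l then some d else pvFind p q r

def minimalfrompart_alt (p : Int) (q : Int) (onesIndex : List Int) (twosIndex : List Int) (threesIndex : List Int) (foursIndex : List Int) : Option Int :=
  pvFind p q [(1, onesIndex), (2, twosIndex), (3, threesIndex), (4, foursIndex)]

-- ===== PRECONDITION & SPEC =====
def Spec_minimalfrompart (p : Int) (q : Int) (onesIndex : List Int) (twosIndex : List Int) (threesIndex : List Int) (foursIndex : List Int) (out : Option Int) : Prop := out = minimalfrompart_alt p q onesIndex twosIndex threesIndex foursIndex
instance (p : Int) (q : Int) (onesIndex : List Int) (twosIndex : List Int) (threesIndex : List Int) (foursIndex : List Int) (out : Option Int) : Decidable (Spec_minimalfrompart p q onesIndex twosIndex threesIndex foursIndex out) := by unfold Spec_minimalfrompart; infer_instance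

-- ===== CLAIM (what is proved, stated in full; the proofs are below) =====
def Claim_equal_minimalfrompart : Prop := ∀ (p : Int) (q : Int) (onesIndex : List Int) (twosIndex : List Int) (threesIndex : List Int) (foursIndex : List Int), Dom_minimalfrompart p q onesIndex twosIndex threesIndex foursIndex → Spec_minimalfrompart p q onesIndex twosIndex threesIndex foursIndex (minimalfrompart p q onesIndex twosIndex threesIndex foursIndex)

-- ===== LEMMAS AND PROOFS =====

-- A's loop returns its digit iff some element lies in [p, q]
lemma pvScanA_eq (p q d : Int) (lst : List Int) :
    pvScanA p q d lst = if lst.any (fun e => decide (p ≤ e) && decide (e ≤ q)) then some d else none := by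
  induction lst with
  | nil => simp [pvScanA]
  | cons e r ih =>
    by_cases h : p ≤ e ∧ e ≤ q
    · simp [pvScanA, h.1, h.2]
    · rcases not_and_or.mp h with h' | h' <;> simp [pvScanA, ih, h']

-- invariant of the binary search: everything left of the result is < p, everything at/right of it is ≥ p
lemma pvBl_inv (s : List Int) (p : Int) (fuel lo hi : Nat)
    (hfuel : hi - lo ≤ fuel)
    (hhi : hi ≤ s.length) (hlh : lo ≤ hi)
    (hs : ∀ i j, i ≤ j → j < s.length → s.getD i 0 ≤ s.getD j 0)
    (hlow : ∀ j, j < lo → s.getD j 0 < p)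
    (hhigh : ∀ j, hi ≤ j → j < s.length → p ≤ s.getD j 0) :
    (∀ j, j < pvBl s p fuel lo hi → s.getD j 0 < p) ∧
    (∀ j, pvBl s p fuel lo hi ≤ j → j < s.length → p ≤ s.getD j 0) ∧
    pvBl s p fuel lo hi ≤ s.length := by
  induction fuel generalizing lo hi with
  | zero =>
    -- fuel 0 forces lo = hi
    have : lo = hi := by omega
    subst this
    rw [pvBl]
    exact ⟨hlow, fun j hj hjl => hhigh j hj hjl, by omega⟩
  | succ fuel ih =>
    rw [pvBl]
    by_cases h : lo < hi
    · rw [if_pos h]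
      by_cases hm : s.getD ((lo + hi) / 2) 0 < p
      · rw [if_pos hm]
        exact ih ((lo + hi) / 2 + 1) hi (by omega) hhi (by omega)
          (fun j hj => lt_of_le_of_lt (hs j ((lo + hi) / 2) (by omega) (by omega)) hm)
          hhigh
      · rw [if_neg hm]
        exact ih lo ((lo + hi) / 2) (by omega) (by omega) (by omega) hlow
          (fun j hj hjl => le_trans (not_lt.mp hm) (hs ((lo + hi) / 2) j hj hjl))
    · rw [if_neg h]
      exact ⟨hlow, fun j hj hjl => hhigh j (by omega) hjl, by omega⟩

-- B's per-list check agrees with A's per-list scan condition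
lemma pvHit_eq (p q : Int) (lst : List Int) :
    pvHit p q lst = lst.any (fun e => decide (p ≤ e) && decide (e ≤ q)) := by
  set s := PySem.List.sorted lst (fun x => x) false with hsdef
  have hperm : s.Perm lst := PySem.List.sorted_perm lst (fun x => x) false
  have hpw : s.Pairwise (fun a b => a ≤ b) := PySem.List.sorted_pairwise lst (fun x => x)
  have hs : ∀ i j, i ≤ j → j < s.length → s.getD i 0 ≤ s.getD j 0 := by
    intro i j hij hjl
    rcases Nat.lt_or_ge i j with h | h
    · rw [List.getD_eq_getElem s 0 (by omega), List.getD_eq_getElem s 0 hjl]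
      exact (List.pairwise_iff_getElem.mp hpw) i j (by omega) hjl h
    · have : i = j := by omega
      subst this; rfl
  have inv := pvBl_inv s p s.length 0 s.length (by omega) le_rfl (Nat.zero_le _) hs
    (fun j hj => absurd hj (Nat.not_lt_zero j)) (fun j hj hjl => absurd hjl (by omega))
  set r := pvBl s p s.length 0 s.length with hr
  have hmem : ∀ e, e ∈ s ↔ e ∈ lst := fun e => hperm.mem_iff
  rw [pvHit]
  simp only [← hsdef, ← hr]
  rcases Bool.eq_false_or_eq_true (lst.any (fun e => decide (p ≤ e) && decide (e ≤ q))) with hany | hany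
  · -- some element in range: B's check must be true
    rw [hany]
    rw [List.any_eq_true] at hany
    simp only [Bool.and_eq_true, decide_eq_true_eq] at hany
    obtain ⟨e, he, hpe, heq⟩ := hany
    obtain ⟨j, hjl, hje⟩ := List.mem_iff_getElem.mp ((hmem e).mpr he)
    have hjD : s.getD j 0 = e := by rw [List.getD_eq_getElem s 0 hjl, hje]
    have hrj : r ≤ j := by
      by_contra hlt
      exact absurd (hjD ▸ inv.1 j (not_le.mp hlt)) (not_lt.mpr hpe)
    have hrl : r < s.length := lt_of_le_of_lt hrj hjl
    have hq : s.getD r 0 ≤ q := le_trans (hjD ▸ hs r j hrj hjl) heq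
    rw [List.getD_eq_getElem s 0 hrl] at hq
    simp [hrl, hq]
  · -- no element in range: B's check must be false
    rw [hany]
    rw [List.any_eq_false] at hany
    by_cases hrl : r < s.length
    · have hp := inv.2.1 r le_rfl hrl
      have hmem' : s.getD r 0 ∈ s := by
        rw [List.getD_eq_getElem s 0 hrl]; exact List.getElem_mem hrl
      have hnq := hany _ ((hmem _).mp hmem')
      simp only [Bool.and_eq_true, decide_eq_true_eq, not_and] at hnq
      have hq' : ¬ s[r] ≤ q := by
        have := hnq hp
        rwa [List.getD_eq_getElem s 0 hrl] at this
      simp [hrl, hq']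
    · simp [hrl]

-- ===== VERDICT (by name: the statement is the Claim_ definition above) =====
theorem minimalfrompart_spec : Claim_equal_minimalfrompart := by
  intro p q a b c d _
  show minimalfrompart p q a b c d = minimalfrompart_alt p q a b c d
  simp only [minimalfrompart, minimalfrompart_alt, pvFind, pvScanA_eq, pvHit_eq]
  cases a.any (fun e => decide (p ≤ e) && decide (e ≤ q)) <;>
    cases b.any (fun e => decide (p ≤ e) && decide (e ≤ q)) <;>
      cases c.any (fun e => decide (p ≤ e) && decide (e ≤ q)) <;>
        cases d.any (fun e => decide (p ≤ e) && decide (e ≤ q)) <;> simp
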